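-- pv_equiv track=rewrite | github.com/wisefood/foodscholar | src/agents/enrichment_agent.py | _homogenize_keywords
-- ===== SOURCE A (Python) =====
-- from typing import List, Dict, Any
-- from collections import Counter, defaultdict
--
-- def _homogenize_keywords(keywords: List[str]) -> List[str]:
--     """
--     Normalize keyword variants to a single representative form.
--
--     Groups keywords by uppercase form and selects the most common variant
--     as the representative. This ensures consistent keyword representation
--     across articles (e.g., "Omega-3" vs "omega-3" -> most common form).
--
--     Args:
--         keywords: List of raw keywords from extraction
--
--     Returns:
--         List of homogenized keywords with consistent casing
--     """
--     if not keywords: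
--         return []
--
--     # Group keywords by uppercase form to find variants
--     groups = defaultdict(list)
--     for k in keywords:
--         groups[k.upper()].append(k)
--
--     # Select most common variant for each group
--     representative = {
--         key: Counter(variants).most_common(1)[0][0]
--         for key, variants in groups.items()
--     }
--
--     return [representative[k.upper()] for k in keywords]
-- ===== SOURCE B (Python) =====
-- def _homogenize_keywords(keywords):
--     # Worklist partition: repeatedly peel off the whole case-variant group of the
--     # first remaining keyword (quicksort-style partition on the uppercase key),
--     # choosing each group's representative with max(run, key=run.count) — no
--     # grouping dict, no Counter.
--     rep = {}
--     rest = keywords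
--     while rest:
--         u = rest[0].upper()
--         run = [k for k in rest if k.upper() == u]
--         rep[u] = max(run, key=run.count)
--         rest = [k for k in rest if k.upper() != u]
--     return [rep[k.upper()] for k in keywords]
-- ===== Notes on version B (the rewrite author's own statement) =====
-- stated objective: alternative
-- what changed: A makes one pass building a defaultdict of per-uppercase variant lists and a dict comprehension picking each representative with Counter(...).most_common(1); B uses neither Counter nor a grouping dict: it repeatedly partitions the remaining keywords on the uppercase form of the first one (quicksort-style worklist), choosing each peeled group's representative with max(run, key=run.count), which keeps the same first-appearance tie-break.
import Mathlib
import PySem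

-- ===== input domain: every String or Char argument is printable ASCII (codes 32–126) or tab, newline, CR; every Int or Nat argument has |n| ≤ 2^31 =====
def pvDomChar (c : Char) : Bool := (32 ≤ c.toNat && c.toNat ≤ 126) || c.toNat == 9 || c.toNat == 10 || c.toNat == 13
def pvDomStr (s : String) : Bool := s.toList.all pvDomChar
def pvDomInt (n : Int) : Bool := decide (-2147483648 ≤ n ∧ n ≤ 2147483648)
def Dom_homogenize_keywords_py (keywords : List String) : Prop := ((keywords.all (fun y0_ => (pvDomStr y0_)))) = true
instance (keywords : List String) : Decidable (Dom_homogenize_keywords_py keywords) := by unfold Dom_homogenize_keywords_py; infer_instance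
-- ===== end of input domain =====

-- B replaces A's one-pass defaultdict grouping + per-group Counter.most_common by a
-- worklist partition (repeatedly peel off the whole case-variant group of the first
-- remaining keyword) picking each representative with max(run, key=run.count) — an
-- alternative algorithm, same result.

-- ===== PORT A =====
-- Counter(variants).most_common(1)[0][0]: most_common(n) is documented as
-- sorted(counter.items(), key=count, reverse=True)[:n] (a stable reverse sort),
-- so [:1][0][0] is the first component of element 0 of that sorted items list.
def pvMostCommon1 (variants : List String) : String :=
  match PySem.List.pyGet? (PySem.List.sorted (PySem.Dict.counter variants).items (fun p => p.2) true) 0 with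
  | some p => p.1
  | none => ""  -- unreachable: every group's variants list is nonempty

def homogenize_keywords_py (keywords : List String) : List String :=
  match keywords with
  | [] => []  -- if not keywords: return []
  | _ =>
    -- groups = defaultdict(list); for k in keywords: groups[k.upper()].append(k)
    let groups : PySem.Dict String (List String) :=
      keywords.foldl (fun d k => d.modify (PySem.Str.upper k) [] (fun l => l ++ [k])) PySem.Dict.empty
    -- representative = {key: Counter(variants).most_common(1)[0][0] for key, variants in groups.items()}
    let representative : PySem.Dict String String :=
      groups.items.foldl (fun d p => d.insert p.1 (pvMostCommon1 p.2)) PySem.Dict.empty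
    -- [representative[k.upper()] for k in keywords]  (the lookup never misses: k.upper() is a key of groups)
    keywords.map (fun k => (representative.get? (PySem.Str.upper k)).getD "")

-- ===== PORT B =====
-- max(run, key=run.count): Python's max keeps the first maximal element
def pvMaxByCount (run : List String) : String :=
  (PySem.List.max? run (fun v => (run.count v : Int))).getD ""  -- "" unreachable: run is never empty

-- the while loop: rest is rebound each iteration, so it becomes this recursion
def pvBuildRep : List String → PySem.Dict String String → PySem.Dict String String
  | [], rep => rep
  | k :: tl, rep =>
    let u := PySem.Str.upper k
    -- run = [k for k in rest if k.upper() == u]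
    let run := (k :: tl).filter (fun x => PySem.Str.upper x == u)
    -- rep[u] = max(run, key=run.count); rest = [k for k in rest if k.upper() != u]
    pvBuildRep ((k :: tl).filter (fun x => PySem.Str.upper x != u)) (rep.insert u (pvMaxByCount run))
termination_by rest _ => rest.length
decreasing_by
  simp only [List.filter_cons, bne_self_eq_false, Bool.false_eq_true, if_false]
  exact Nat.lt_succ_of_le (List.length_filter_le _ _)

def homogenize_keywords_py_alt (keywords : List String) : List String :=
  let rep := pvBuildRep keywords PySem.Dict.empty
  -- [rep[k.upper()] for k in keywords]  (the lookup never misses)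
  keywords.map (fun k => (rep.get? (PySem.Str.upper k)).getD "")

-- ===== PRECONDITION & SPEC =====
def Spec_homogenize_keywords_py (keywords : List String) (out : List String) : Prop := out = homogenize_keywords_py_alt keywords
instance (keywords : List String) (out : List String) : Decidable (Spec_homogenize_keywords_py keywords out) := by unfold Spec_homogenize_keywords_py; infer_instance

-- ===== CLAIM (what is proved, stated in full; the proofs are below) =====
def Claim_equal_homogenize_keywords_py : Prop := ∀ (keywords : List String), Dom_homogenize_keywords_py keywords → Spec_homogenize_keywords_py keywords (homogenize_keywords_py keywords)

-- ===== LEMMAS AND PROOFS =====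

-- one fold step of Python's max(..., key=...) from the right
theorem pv_max?_append_none {α : Type} (l : List α) (x : α) (key : α → Int)
    (h : PySem.List.max? l key = none) :
    PySem.List.max? (l ++ [x]) key = some x := by
  simp only [PySem.List.max?] at h ⊢
  rw [List.foldl_append, List.foldl_cons, List.foldl_nil, h]

theorem pv_max?_append_some {α : Type} (l : List α) (x m : α) (key : α → Int)
    (h : PySem.List.max? l key = some m) :
    PySem.List.max? (l ++ [x]) key = if key m < key x then some x else some m := by
  simp only [PySem.List.max?] at h ⊢
  rw [List.foldl_append, List.foldl_cons, List.foldl_nil, h]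

-- the head of a stable reverse sort by an Int key is Python's max (ties to the first)
theorem pv_head_sorted_rev {α : Type} (xs : List α) (key : α → Int) :
    (PySem.List.sorted xs key true).head? = PySem.List.max? xs key := by
  induction xs using List.reverseRecOn with
  | nil => rfl
  | append_singleton l x ih =>
    rw [PySem.List.sorted_rev_eq_foldl_insertBy, List.foldl_append,
      ← PySem.List.sorted_rev_eq_foldl_insertBy]
    simp only [List.foldl_cons, List.foldl_nil]
    cases h : PySem.List.sorted l key true with
    | nil =>
      have hl : l = [] := (PySem.List.sorted_eq_nil_iff l key true).mp h
      subst hl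
      simp [PySem.List.insertBy, PySem.List.max?]
    | cons y t =>
      have hy : PySem.List.max? l key = some y := by rw [← ih, h]; simp
      rw [pv_max?_append_some l x y key hy]
      by_cases hlt : key y < key x
      · simp [PySem.List.insertBy, hlt]
      · simp [PySem.List.insertBy, hlt]

theorem pv_max?_map {α β : Type} (l : List α) (f : α → β) (key : β → Int) :
    PySem.List.max? (l.map f) key = (PySem.List.max? l (fun x => key (f x))).map f := by
  induction l using List.reverseRecOn with
  | nil => rfl
  | append_singleton l x ih =>
    rw [List.map_append, List.map_singleton]
    cases h : PySem.List.max? l (fun x => key (f x)) with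
    | none =>
      rw [h] at ih
      rw [pv_max?_append_none (l.map f) (f x) key ih, pv_max?_append_none l x _ h]
      rfl
    | some m =>
      rw [h] at ih
      rw [pv_max?_append_some (l.map f) (f x) (f m) key ih, pv_max?_append_some l x m _ h]
      by_cases hlt : key (f m) < key (f x) <;> simp [hlt]

-- deduplication does not change the first maximum
theorem pv_max?_ofList (xs : List String) (key : String → Int) :
    PySem.List.max? (PySem.Set.ofList xs) key = PySem.List.max? xs key := by
  induction xs using List.reverseRecOn with
  | nil => rfl
  | append_singleton l x ih =>
    rw [PySem.Set.ofList_append_singleton, PySem.Set.add_eq_ite]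
    by_cases hm : x ∈ PySem.Set.ofList l
    · have hxl : x ∈ l := (PySem.Set.mem_ofList _ _).mp hm
      have hne : l ≠ [] := List.ne_nil_of_mem hxl
      simp only [hm, if_true, ih]
      cases h : PySem.List.max? l key with
      | none => exact absurd ((PySem.List.max?_eq_none_iff l key).mp h) hne
      | some m =>
        have hle : key x ≤ key m := PySem.List.max?_isMax h x hxl
        rw [pv_max?_append_some l x m key h, if_neg (not_lt.mpr hle)]
    · simp only [hm, if_false]
      cases h : PySem.List.max? l key with
      | none =>
        rw [pv_max?_append_none l x key h]
        rw [h] at ih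
        rw [pv_max?_append_none _ x key ih]
      | some m =>
        rw [pv_max?_append_some l x m key h]
        rw [h] at ih
        rw [pv_max?_append_some _ x m key ih]

-- A's grouping loop: the group stored under u is exactly the sublist with uppercase form u
theorem pv_groups_getD (keywords : List String) (u : String) :
    (keywords.foldl (fun d k => d.modify (PySem.Str.upper k) [] (fun l => l ++ [k])) PySem.Dict.empty).getD u []
      = keywords.filter (fun x => PySem.Str.upper x == u) := by
  have hmap : (keywords.foldl (fun d k => d.modify (PySem.Str.upper k) [] (fun l => l ++ [k])) (PySem.Dict.empty : PySem.Dict String (List String)))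
      = (keywords.map (fun k => (PySem.Str.upper k, k))).foldl
          (fun d p => d.modify p.1 [] (fun l => l ++ [p.2])) PySem.Dict.empty := by
    rw [List.foldl_map]
  rw [hmap, PySem.Dict.getD_foldl_modify_append]
  simp [List.filter_map, Function.comp_def]

-- A's representative dict: the entry under k.upper() is most_common of the group's variants
theorem pv_repr_get? (keywords : List String) (k : String) (hk : k ∈ keywords) :
    ((keywords.foldl (fun d k => d.modify (PySem.Str.upper k) [] (fun l => l ++ [k])) PySem.Dict.empty).items.foldl
        (fun d p => d.insert p.1 (pvMostCommon1 p.2)) PySem.Dict.empty).get? (PySem.Str.upper k)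
      = some (pvMostCommon1 (keywords.filter (fun x => PySem.Str.upper x == PySem.Str.upper k))) := by
  set groups := keywords.foldl (fun d k => d.modify (PySem.Str.upper k) [] (fun l => l ++ [k])) PySem.Dict.empty with hg
  have hkeys : groups.keys = PySem.Set.ofList (keywords.map PySem.Str.upper) := by
    rw [hg, PySem.Dict.keys_foldl_modify_key keywords PySem.Str.upper [] (fun _ x => fun l => l ++ [x]) PySem.Dict.empty]
    simp [PySem.Set.update_nil_left]
  have hnod : groups.keys.Nodup := by rw [hkeys]; exact PySem.Set.nodup_ofList _
  have hitems : groups.items = groups.keys.map (fun c => (c, groups.getD c [])) :=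
    PySem.Dict.items_eq_map_keys groups hnod []
  have hfst : groups.items.map (fun p => p.1) = groups.keys := rfl
  have hrepr : (groups.items.foldl (fun d p => d.insert p.1 (pvMostCommon1 p.2)) PySem.Dict.empty).items
      = groups.items.map (fun p => (p.1, pvMostCommon1 p.2)) := by
    have h := PySem.Dict.items_foldl_insert_fresh groups.items (fun p => p.1) (fun p => pvMostCommon1 p.2)
      PySem.Dict.empty (fun a _ => by simp [PySem.Dict.contains_empty]) (by rw [hfst]; exact hnod)
    simpa using h
  have hmem : PySem.Str.upper k ∈ groups.keys := by
    rw [hkeys]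
    exact (PySem.Set.mem_ofList _ _).mpr (List.mem_map_of_mem hk)
  have hpair : (PySem.Str.upper k, pvMostCommon1 (groups.getD (PySem.Str.upper k) []))
      ∈ (groups.items.foldl (fun d p => d.insert p.1 (pvMostCommon1 p.2)) PySem.Dict.empty).items := by
    rw [hrepr, hitems, List.map_map]
    exact List.mem_map_of_mem hmem
  have hnod2 : (groups.items.foldl (fun d p => d.insert p.1 (pvMostCommon1 p.2)) PySem.Dict.empty).keys.Nodup := by
    have : (groups.items.foldl (fun d p => d.insert p.1 (pvMostCommon1 p.2)) PySem.Dict.empty).keys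
        = (groups.items.map (fun p => (p.1, pvMostCommon1 p.2))).map (fun p => p.1) := by
      rw [← hrepr]; rfl
    rw [this, List.map_map]
    exact hfst ▸ hnod
  rw [PySem.Dict.get?_of_mem_items _ hpair hnod2, hg, pv_groups_getD]

-- pointwise core: most_common(1) of a nonempty group = max(group, key=group.count)
theorem pv_point (vs : List String) (hne : vs ≠ []) :
    pvMostCommon1 vs = pvMaxByCount vs := by
  obtain ⟨m, hm⟩ : ∃ m, PySem.List.max? vs (fun c => (vs.count c : Int)) = some m := by
    cases h : PySem.List.max? vs (fun c => (vs.count c : Int)) with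
    | none => exact absurd ((PySem.List.max?_eq_none_iff _ _).mp h) hne
    | some m => exact ⟨m, rfl⟩
  have hhead : (PySem.List.sorted (PySem.Dict.counter vs).items (fun p => p.2) true).head?
      = some (m, (vs.count m : Int)) := by
    rw [pv_head_sorted_rev, PySem.Dict.items_counter, pv_max?_map, pv_max?_ofList]
    simp only [hm, Option.map_some]
  obtain ⟨t, hsort⟩ : ∃ t, PySem.List.sorted (PySem.Dict.counter vs).items (fun p => p.2) true
      = (m, (vs.count m : Int)) :: t := by
    cases h : PySem.List.sorted (PySem.Dict.counter vs).items (fun p => p.2) true with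
    | nil => rw [h] at hhead; exact absurd hhead (by simp)
    | cons y t =>
      rw [h] at hhead
      simp only [List.head?_cons, Option.some.injEq] at hhead
      exact ⟨t, by rw [hhead]⟩
  have hA : pvMostCommon1 vs = m := by
    unfold pvMostCommon1
    rw [hsort]
    norm_num [PySem.List.pyGet?, PySem.List.pyIdx?]
  rw [hA]
  unfold pvMaxByCount
  rw [hm]
  rfl

-- B's worklist loop: what the rep dict ends up holding under each key
theorem pv_buildRep_get? (rest : List String) (rep : PySem.Dict String String) (u : String) :
    (pvBuildRep rest rep).get? u
      = if rest.filter (fun x => PySem.Str.upper x == u) = [] then rep.get? u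
        else some (pvMaxByCount (rest.filter (fun x => PySem.Str.upper x == u))) := by
  induction rest, rep using pvBuildRep.induct generalizing u with
  | case1 rep => simp [pvBuildRep]
  | case2 k tl rep _u _run ih =>
    rw [pvBuildRep]
    rw [ih]
    by_cases hu : u = PySem.Str.upper k
    · subst hu
      have hnil : ((k :: tl).filter (fun x => PySem.Str.upper x != PySem.Str.upper k)).filter
          (fun x => PySem.Str.upper x == PySem.Str.upper k) = [] := by
        rw [List.filter_filter]
        apply List.filter_eq_nil_iff.mpr
        intro x _
        simp [Bool.and_comm]
      have hhd : ((k :: tl).filter (fun x => PySem.Str.upper x == PySem.Str.upper k)) ≠ [] := by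
        intro h
        have : k ∈ (k :: tl).filter (fun x => PySem.Str.upper x == PySem.Str.upper k) :=
          List.mem_filter.mpr ⟨List.mem_cons_self, by simp⟩
        rw [h] at this
        exact absurd this (List.not_mem_nil)
      rw [if_pos hnil, if_neg hhd, PySem.Dict.get?_insert_self]
    · have hcomm : ((k :: tl).filter (fun x => PySem.Str.upper x != PySem.Str.upper k)).filter
          (fun x => PySem.Str.upper x == u)
          = (k :: tl).filter (fun x => PySem.Str.upper x == u) := by
      -- filtering out the u0-group does not touch the u-group (u ≠ u0)
        rw [List.filter_filter]
        apply List.filter_congr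
        intro x _
        by_cases hx : PySem.Str.upper x = u
        · simp [hx, hu]
        · simp [hx]
      rw [hcomm, PySem.Dict.get?_insert_of_ne _ _ hu]

-- ===== VERDICT (by name: the statement is the Claim_ definition above) =====
theorem homogenize_keywords_py_spec : Claim_equal_homogenize_keywords_py := by
  intro keywords _hdom
  unfold Spec_homogenize_keywords_py
  cases hkw : keywords with
  | nil => rfl
  | cons k0 rest =>
    simp only [homogenize_keywords_py, homogenize_keywords_py_alt]
    apply List.map_congr_left
    intro k hk
    have hne : (k0 :: rest).filter (fun x => PySem.Str.upper x == PySem.Str.upper k) ≠ [] := by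
      intro h
      have : k ∈ (k0 :: rest).filter (fun x => PySem.Str.upper x == PySem.Str.upper k) :=
        List.mem_filter.mpr ⟨hk, by simp⟩
      rw [h] at this
      exact absurd this (List.not_mem_nil)
    rw [pv_repr_get? (k0 :: rest) k hk, pv_buildRep_get?, if_neg hne, Option.getD_some,
      Option.getD_some]
    exact pv_point _ hne
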